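-- pv_equiv track=rewrite | github.com/Malsdepot/GoogleCodeJam2022 | d1000000.py | sortDie
-- ===== SOURCE A (Python) =====
-- def sortDie(dieCollection):
--     straight = 0
--     for i in range(len(dieCollection)):
--         if i < dieCollection[i]:
--             straight +=1
--
--     if straight < len(dieCollection):
--         dieCollection.pop(0)
--         straight = sortDie(dieCollection)
--     return straight
-- ===== SOURCE B (Python) =====
-- def sortDie(dieCollection):
--     # Single backward pass: maintain running max m of (index - value) over the
--     # suffix; the smallest front-drop p that makes every remaining index i
--     # satisfy i < value is the smallest k with k > m; answer is n - p.
--     # (Unlike A, this does not mutate dieCollection; return value only.)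
--     n = len(dieCollection)
--     p = n
--     m = None
--     k = n
--     for v in reversed(dieCollection):
--         k -= 1
--         d = k - v
--         if m is None or d > m:
--             m = d
--         if k > m:
--             p = k
--     return n - p
-- ===== Notes on version B (the rewrite author's own statement) =====
-- stated objective: faster
-- what changed: A repeatedly recounts i<L[i] over every suffix obtained by popping the front (and mutates its argument); B makes a single backward pass maintaining the running maximum of index-value to find the smallest front-drop directly, without mutating the input.
import Mathlib
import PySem

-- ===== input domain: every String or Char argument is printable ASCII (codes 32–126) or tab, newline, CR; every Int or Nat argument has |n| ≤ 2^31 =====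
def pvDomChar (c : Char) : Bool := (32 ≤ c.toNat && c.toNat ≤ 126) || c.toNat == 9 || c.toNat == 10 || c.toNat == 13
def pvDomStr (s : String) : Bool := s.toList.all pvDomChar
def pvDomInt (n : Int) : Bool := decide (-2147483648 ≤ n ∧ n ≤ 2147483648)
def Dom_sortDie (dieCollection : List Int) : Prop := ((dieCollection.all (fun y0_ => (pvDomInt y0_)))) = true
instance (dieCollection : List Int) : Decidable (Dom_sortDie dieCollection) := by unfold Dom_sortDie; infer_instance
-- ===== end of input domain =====

-- B replaces A's O(n^2) pop-and-recount recursion by one backward pass tracking the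
-- running max of (index - value); equivalence is about the RETURN value only (A pops
-- elements from its argument in place, B does not mutate it).

-- ===== PORT A =====
-- the counting loop `for i in range(len): if i < L[i]: straight += 1`
def straightA : List Int → Int → Int → Int
  | [], _, s => s
  | x :: xs, i, s => straightA xs (i + 1) (if i < x then s + 1 else s)

theorem le_straightA : ∀ (l : List Int) (i s : Int), s ≤ straightA l i s := by
  intro l
  induction l with
  | nil => intro i s; simp [straightA]
  | cons x xs ih =>
    intro i s
    simp only [straightA]
    split
    · exact le_trans (by omega) (ih (i + 1) (s + 1))
    · exact ih (i + 1) s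

def sortDie (dieCollection : List Int) : Int :=
  if h : straightA dieCollection 0 0 < (dieCollection.length : Int) then
    sortDie (dieCollection.drop 1)   -- dieCollection.pop(0); recurse
  else
    straightA dieCollection 0 0
termination_by dieCollection.length
decreasing_by
  have h0 : (0 : Int) ≤ straightA dieCollection 0 0 := le_straightA dieCollection 0 0
  have hlen : (0 : Int) < (dieCollection.length : Int) := lt_of_le_of_lt h0 h
  have : 0 < dieCollection.length := by exact_mod_cast hlen
  simp only [List.length_drop]
  omega

-- ===== PORT B =====
-- one step of the backward loop `for v in reversed(dieCollection)` over state (k, m, p)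
def stepB (st : Int × Option Int × Int) (v : Int) : Int × Option Int × Int :=
  let k := st.1 - 1
  let d := k - v
  let m : Int :=
    match st.2.1 with
    | none => d
    | some m0 => if d > m0 then d else m0
  let p := if k > m then k else st.2.2
  (k, some m, p)

def sortDie_alt (dieCollection : List Int) : Int :=
  let n : Int := dieCollection.length
  let st := dieCollection.reverse.foldl stepB (n, none, n)
  n - st.2.2

-- ===== PRECONDITION & SPEC =====
def Spec_sortDie (dieCollection : List Int) (out : Int) : Prop := out = sortDie_alt dieCollection
instance (dieCollection : List Int) (out : Int) : Decidable (Spec_sortDie dieCollection out) := by unfold Spec_sortDie; infer_instance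

-- ===== CLAIM (what is proved, stated in full; the proofs are below) =====
def Claim_equal_sortDie : Prop := ∀ (dieCollection : List Int), Dom_sortDie dieCollection → Spec_sortDie dieCollection (sortDie dieCollection)

-- ===== LEMMAS AND PROOFS =====

-- "every index i (from offset) satisfies i < l[i]"
def okFrom : List Int → Int → Bool
  | [], _ => true
  | x :: xs, i => (decide (i < x)) && okFrom xs (i + 1)

theorem straightA_le : ∀ (l : List Int) (i s : Int), straightA l i s ≤ s + l.length := by
  intro l
  induction l with
  | nil => intro i s; simp [straightA]
  | cons x xs ih =>
    intro i s
    simp only [straightA, List.length_cons]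
    split
    · have := ih (i + 1) (s + 1); push_cast; push_cast at this; omega
    · have := ih (i + 1) s; push_cast; push_cast at this; omega

theorem straightA_eq_iff : ∀ (l : List Int) (i s : Int),
    straightA l i s = s + l.length ↔ okFrom l i = true := by
  intro l
  induction l with
  | nil => intro i s; simp [straightA, okFrom]
  | cons x xs ih =>
    intro i s
    simp only [straightA, okFrom, List.length_cons, Bool.and_eq_true, decide_eq_true_eq]
    split
    · rename_i hix
      have := ih (i + 1) (s + 1)
      constructor
      · intro h
        refine ⟨hix, (this).1 ?_⟩
        push_cast at h ⊢; omega
      · intro h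
        have := (this).2 h.2
        push_cast at this ⊢; omega
    · rename_i hix
      have hle := straightA_le xs (i + 1) s
      constructor
      · intro h; push_cast at h hle; omega
      · intro h; exact absurd h.1 hix

-- A-side recurrences
theorem sortDie_nil : sortDie [] = 0 := by
  rw [sortDie]; simp [straightA]

theorem sortDie_cons (x : Int) (l : List Int) :
    sortDie (x :: l) = if okFrom (x :: l) 0 then ((x :: l).length : Int) else sortDie l := by
  rw [sortDie]
  by_cases hok : okFrom (x :: l) 0 = true
  · have heq : straightA (x :: l) 0 0 = 0 + (x :: l).length :=
      (straightA_eq_iff (x :: l) 0 0).2 hok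
    rw [dif_neg (by omega), heq, if_pos hok]
    omega
  · have hne : straightA (x :: l) 0 0 ≠ 0 + (x :: l).length := fun h =>
      hok ((straightA_eq_iff (x :: l) 0 0).1 h)
    have hle := straightA_le (x :: l) 0 0
    rw [dif_pos (by omega), if_neg hok]
    simp

-- B-side: first component of the fold
theorem foldB_fst : ∀ (xs : List Int) (k : Int) (m : Option Int) (p : Int),
    (xs.foldl stepB (k, m, p)).1 = k - xs.length := by
  intro xs
  induction xs with
  | nil => intro k m p; simp
  | cons v xs ih =>
    intro k m p
    simp only [List.foldl_cons, stepB, List.length_cons]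
    rw [ih]
    push_cast; ring

-- B-side: shifting the initial state by one shifts the whole run by one
theorem stepB_shift (k : Int) (m : Option Int) (p : Int) (w : Int) :
    stepB (k + 1, m.map (· + 1), p + 1) w =
      ((stepB (k, m, p) w).1 + 1, (stepB (k, m, p) w).2.1.map (· + 1),
       (stepB (k, m, p) w).2.2 + 1) := by
  cases m with
  | none =>
    simp only [stepB, Option.map_none, Option.map_some, Prod.mk.injEq]
    refine ⟨by ring, by simp only [Option.some.injEq]; ring, ?_⟩
    split_ifs <;> omega
  | some m0 =>
    simp only [stepB, Option.map_some, Prod.mk.injEq]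
    refine ⟨by ring, ?_, ?_⟩
    · simp only [Option.some.injEq]
      split_ifs <;> omega
    · split_ifs <;> omega

-- B-side: shifting the initial state by one shifts the whole run by one
theorem foldB_shift : ∀ (xs : List Int) (k : Int) (m : Option Int) (p : Int),
    xs.foldl stepB (k + 1, m.map (· + 1), p + 1) =
      ((xs.foldl stepB (k, m, p)).1 + 1,
       (xs.foldl stepB (k, m, p)).2.1.map (· + 1),
       (xs.foldl stepB (k, m, p)).2.2 + 1) := by
  intro xs
  induction xs with
  | nil => intro k m p; simp
  | cons v xs ih =>
    intro k m p
    simp only [List.foldl_cons]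
    rw [stepB_shift]
    have := ih ((stepB (k, m, p) v).1) ((stepB (k, m, p) v).2.1) ((stepB (k, m, p) v).2.2)
    simpa using this

-- reversed-index all-ok predicate
def okRev : List Int → Int → Bool
  | [], _ => true
  | v :: xs, k => (decide (k - 1 < v)) && okRev xs (k - 1)

def goodOpt : Option Int → Bool
  | none => true
  | some v => decide (v < 0)

theorem foldB_good : ∀ (xs : List Int) (k : Int) (m : Option Int) (p : Int),
    goodOpt (xs.foldl stepB (k, m, p)).2.1 = (goodOpt m && okRev xs k) := by
  intro xs
  induction xs with
  | nil => intro k m p; simp only [List.foldl_nil, okRev, Bool.and_true]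
  | cons v xs ih =>
    intro k m p
    simp only [List.foldl_cons, okRev]
    rw [show stepB (k, m, p) v =
        ((stepB (k, m, p) v).1, (stepB (k, m, p) v).2.1, (stepB (k, m, p) v).2.2) from rfl]
    rw [ih]
    have hm : goodOpt (stepB (k, m, p) v).2.1 = (goodOpt m && decide (k - 1 < v)) := by
      cases m with
      | none =>
        simp only [stepB, goodOpt, Bool.true_and, decide_eq_decide]
        omega
      | some m0 =>
        simp only [stepB, goodOpt]
        split_ifs with h <;> (rw [← Bool.decide_and, decide_eq_decide]; omega)
    rw [hm, Bool.and_assoc, show (stepB (k, m, p) v).1 = k - 1 from rfl]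

theorem okRev_append : ∀ (xs ys : List Int) (k : Int),
    okRev (xs ++ ys) k = (okRev xs k && okRev ys (k - xs.length)) := by
  intro xs
  induction xs with
  | nil => intro ys k; simp [okRev]
  | cons v xs ih =>
    intro ys k
    simp only [List.cons_append, okRev, ih, List.length_cons]
    have : k - 1 - (xs.length : Int) = k - ((xs.length : Int) + 1) := by ring
    rw [this]
    push_cast
    cases decide (k - 1 < v) <;> simp

theorem okRev_reverse : ∀ (l : List Int) (i : Int),
    okRev l.reverse (i + l.length) = okFrom l i := by
  intro l
  induction l with
  | nil => intro i; simp [okRev, okFrom]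
  | cons x t ih =>
    intro i
    simp only [List.reverse_cons, okRev_append, okFrom, List.length_cons, List.length_reverse]
    have h1 : i + ((t.length : Int) + 1) - (t.length : Int) = i + 1 := by ring
    have h2 : i + ((t.length : Int) + 1) = (i + 1) + (t.length : Int) := by ring
    push_cast
    push_cast at h1 h2
    rw [h1, h2, ih (i + 1)]
    simp [okRev]
    cases okFrom t (i + 1) <;> cases decide (i < x) <;> simp

theorem sortDie_alt_nil : sortDie_alt [] = 0 := by
  simp [sortDie_alt]

-- nonempty folds always carry a running maximum
theorem foldB_some : ∀ (ys : List Int) (k : Int) (m : Option Int) (p : Int), ys ≠ [] →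
    ∃ M, (ys.foldl stepB (k, m, p)).2.1 = some M := by
  intro ys
  induction ys with
  | nil => intro k m p h; exact absurd rfl h
  | cons w ys ih =>
    intro k m p _
    simp only [List.foldl_cons]
    cases ys with
    | nil => exact ⟨_, rfl⟩
    | cons a b => exact ih _ _ _ (by simp)

theorem sortDie_alt_cons (x : Int) (l : List Int) :
    sortDie_alt (x :: l) = if okFrom (x :: l) 0 then ((x :: l).length : Int) else sortDie_alt l := by
  rcases hst : List.foldl stepB ((l.length : Int), none, (l.length : Int)) l.reverse with ⟨a, m, p⟩
  cases m with
  | none =>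
    have hl : l = [] := by
      rcases l with _ | ⟨y, t⟩
      · rfl
      · exfalso
        obtain ⟨M, hM⟩ := foldB_some (y :: t).reverse (((y :: t).length : Int)) none
          (((y :: t).length : Int)) (by simp)
        rw [hst] at hM
        simp at hM
    subst hl
    simp only [sortDie_alt, List.reverse_cons, List.reverse_nil, List.nil_append,
      List.foldl_cons, List.foldl_nil, stepB, okFrom, List.length_cons, List.length_nil]
    split_ifs <;> simp_all <;> omega
  | some M =>
    have ha : a = 0 := by
      have h := foldB_fst l.reverse ((l.length : Int)) none ((l.length : Int))
      rw [hst] at h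
      simpa using h
    subst ha
    have halt : sortDie_alt l = (l.length : Int) - p := by
      simp only [sortDie_alt, hst]
    have hshift := foldB_shift l.reverse ((l.length : Int)) none ((l.length : Int))
    rw [hst] at hshift
    simp only [Option.map_none, Option.map_some] at hshift
    have hlen : ((x :: l).length : Int) = (l.length : Int) + 1 := by
      rw [List.length_cons]; push_cast; ring
    have hxl : sortDie_alt (x :: l)
        = ((l.length : Int) + 1) - (stepB (0 + 1, some (M + 1), p + 1) x).2.2 := by
      simp only [sortDie_alt, List.reverse_cons, List.foldl_append, List.foldl_cons,
        List.foldl_nil, hlen]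
      rw [hshift]
    have hgood : goodOpt (stepB (0 + 1, some (M + 1), p + 1) x).2.1 = okFrom (x :: l) 0 := by
      have h1 := foldB_good ((x :: l).reverse) ((l.length : Int) + 1) none ((l.length : Int) + 1)
      simp only [List.reverse_cons, List.foldl_append, List.foldl_cons, List.foldl_nil] at h1
      rw [hshift] at h1
      rw [h1]
      have h2 := okRev_reverse (x :: l) 0
      have h3 : ((0 : Int) + ((x :: l).length : Int)) = (l.length : Int) + 1 := by
        rw [List.length_cons]; push_cast; ring
      rw [h3] at h2
      simp only [List.reverse_cons] at h2
      rw [← h2]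
      simp [goodOpt]
    rw [hxl, halt]
    simp only [stepB, goodOpt] at hgood ⊢
    by_cases hok : okFrom (x :: l) 0 = true
    · rw [hok] at hgood
      rw [if_pos hok, hlen]
      have hneg := of_decide_eq_true hgood
      split_ifs at hneg ⊢ <;> omega
    · have hok2 : okFrom (x :: l) 0 = false := by
        cases h : okFrom (x :: l) 0
        · rfl
        · exact absurd h hok
      rw [hok2] at hgood
      rw [if_neg hok]
      have hpos := of_decide_eq_false hgood
      split_ifs at hpos ⊢ <;> omega

theorem sortDie_eq_alt : ∀ (l : List Int), sortDie l = sortDie_alt l := by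
  intro l
  induction l with
  | nil => rw [sortDie_nil, sortDie_alt_nil]
  | cons x t ih =>
    rw [sortDie_cons, sortDie_alt_cons, ih]

-- ===== VERDICT (by name: the statement is the Claim_ definition above) =====
theorem sortDie_spec : Claim_equal_sortDie := by
  intro l _
  unfold Spec_sortDie
  exact sortDie_eq_alt l
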